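-- pv_equiv track=rewrite | github.com/marstepanyan/10day_homework | 08.08.ex1.py | build_target
-- ===== SOURCE A (Python) =====
-- def build_target(target, n):
--     new_target = []
--     res = []
--     lst = [i for i in range(1, n + 1)]
--     for item in lst:
--         new_target.append(item)
--         res.append("Push")
--         if item not in target:
--             new_target.pop()
--             res.append("Pop")
--         if new_target == target:
--             break
--
--     return res
-- ===== SOURCE B (Python) =====
-- def build_target(target, n):
--     tset = set(target)
--     m = len(target)
--     res = []
--     k = 0            # length of the matched prefix of target
--     prefix_ok = True # kept elements so far are exactly target[:k]
--     for item in range(1, n + 1):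
--         res.append("Push")
--         if item in tset:
--             if prefix_ok and k < m and target[k] == item:
--                 k += 1
--             else:
--                 prefix_ok = False
--         else:
--             res.append("Pop")
--         if prefix_ok and k == m:
--             break
--     return res
-- ===== Notes on version B (the rewrite author's own statement) =====
-- stated objective: faster
-- what changed: B replaces A's per-iteration membership scan of target and full list comparison with a precomputed set plus an incrementally tracked matched-prefix length, removing both inner scans.
import Mathlib
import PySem

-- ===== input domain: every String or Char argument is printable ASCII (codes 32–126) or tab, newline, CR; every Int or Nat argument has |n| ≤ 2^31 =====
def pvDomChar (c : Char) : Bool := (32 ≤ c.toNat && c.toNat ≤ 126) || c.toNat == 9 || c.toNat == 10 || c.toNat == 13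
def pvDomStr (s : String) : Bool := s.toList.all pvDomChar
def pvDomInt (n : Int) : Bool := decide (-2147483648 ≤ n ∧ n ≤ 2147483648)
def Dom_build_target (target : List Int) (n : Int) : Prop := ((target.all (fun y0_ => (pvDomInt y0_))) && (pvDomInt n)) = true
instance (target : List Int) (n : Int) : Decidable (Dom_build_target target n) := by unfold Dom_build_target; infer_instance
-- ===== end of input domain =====

-- B replaces A's per-iteration membership scan and list comparison with a set plus incremental prefix tracking (asymptotically faster in Python; equivalence of return values proved below).

-- ===== PORT A =====
-- loop over lst with state (new_target, res); early break when new_target == target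
def build_target_go (target : List Int) : List Int → List Int → List String → List String
  | [], _, res => res
  | item :: rest, new_target, res =>
      let new_target1 := new_target ++ [item]
      let res1 := res ++ ["Push"]
      let st := if target.contains item then (new_target1, res1)
                else (new_target1.dropLast, res1 ++ ["Pop"])
      if st.1 = target then st.2
      else build_target_go target rest st.1 st.2

def build_target (target : List Int) (n : Int) : List String :=
  build_target_go target (PySem.List.pyRange 1 (n + 1) 1) [] []

-- ===== PORT B =====
-- loop over range with state (k, prefix_ok, res); tset = set(target), m = len(target)
def build_target_alt_go (target : List Int) (tset : PySem.Set Int) (m : Int) :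
    List Int → Int → Bool → List String → List String
  | [], _, _, res => res
  | item :: rest, k, prefix_ok, res =>
      let res1 := res ++ ["Push"]
      let st :=
        if tset.contains item then
          if prefix_ok && decide (k < m) && (PySem.List.pyGetD target k 0 == item)
          then (k + 1, prefix_ok, res1)
          else (k, false, res1)
        else (k, prefix_ok, res1 ++ ["Pop"])
      if st.2.1 && decide (st.1 = m) then st.2.2
      else build_target_alt_go target tset m rest st.1 st.2.1 st.2.2

def build_target_alt (target : List Int) (n : Int) : List String :=
  build_target_alt_go target (PySem.Set.ofList target) (target.length : Int)
    (PySem.List.pyRange 1 (n + 1) 1) 0 true []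

-- ===== PRECONDITION & SPEC =====
def Spec_build_target (target : List Int) (n : Int) (out : List String) : Prop := out = build_target_alt target n
instance (target : List Int) (n : Int) (out : List String) : Decidable (Spec_build_target target n out) := by unfold Spec_build_target; infer_instance

-- ===== CLAIM (what is proved, stated in full; the proofs are below) =====
def Claim_equal_build_target : Prop := ∀ (target : List Int) (n : Int), Dom_build_target target n → Spec_build_target target n (build_target target n)

-- ===== LEMMAS AND PROOFS =====

-- invariant tying A's new_target to B's (k, prefix_ok)
def PvInv (target new_target : List Int) (k : Int) (ok : Bool) : Prop :=
  if ok then ∃ m : Nat, k = (m : Int) ∧ m ≤ target.length ∧ new_target = target.take m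
  else ¬ new_target <+: target

lemma not_prefix_of_ne_get (target : List Int) (m : Nat) (item : Int)
    (hm : m < target.length) (hne : target.getD m 0 ≠ item) :
    ¬ (target.take m ++ [item]) <+: target := by
  rintro ⟨t, ht⟩
  have hlen : (target.take m).length = m := by
    simp [List.length_take, Nat.min_eq_left (le_of_lt hm)]
  have h2 : target[m]? = some item := by
    conv_lhs => rw [← ht]
    rw [List.append_assoc, List.getElem?_append_right (by omega)]
    simp [hlen]
  exact hne (by rw [List.getD_eq_getElem?_getD, h2]; rfl)

lemma go_eq (target : List Int) (items : List Int) :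
    ∀ (new_target : List Int) (k : Int) (ok : Bool) (res : List String),
    PvInv target new_target k ok →
    build_target_go target items new_target res =
      build_target_alt_go target (PySem.Set.ofList target) (target.length : Int) items k ok res := by
  induction items with
  | nil => intro _ _ _ _ _; simp [build_target_go, build_target_alt_go]
  | cons item rest ih =>
    intro new_target k ok res hinv
    simp only [build_target_go, build_target_alt_go]
    have hmem : (PySem.Set.ofList target).contains item = target.contains item := by
      by_cases h : item ∈ target <;>
        simp [PySem.Set.contains_eq_listContains, PySem.Set.mem_ofList, h]
    rw [hmem]
    by_cases hc : target.contains item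
    · -- item ∈ target: A appends; B updates (k, ok)
      have hcm : item ∈ target := by simpa using hc
      simp only [if_pos hc]
      by_cases hok : ok = true
      · subst hok
        obtain ⟨m, hk, hmle, hnt⟩ := by simpa [PvInv] using hinv
        subst hk hnt
        by_cases hlt : m < target.length
        · by_cases hit : target.getD m 0 = item
          · -- prefix extends
            have hgm : target[m] = item := by
              rw [← hit, List.getD_eq_getElem?_getD, List.getElem?_eq_getElem hlt]; rfl
            have hcond : (true && decide ((m : Int) < (target.length : Int)) &&
                (PySem.List.pyGetD target (m : Int) 0 == item)) = true := by
              simp [hlt, hgm]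
            rw [hcond]
            have htake : target.take m ++ [item] = target.take (m + 1) := by
              rw [List.take_add_one, List.getElem?_eq_getElem hlt]
              simp [hgm]
            by_cases heq : target.take (m+1) = target
            · have hm1 : m + 1 = target.length := by
                have := congrArg List.length heq
                simp [List.length_take] at this
                omega
              rw [htake, if_pos heq]
              have : ((m : Int) + 1 = (target.length : Int)) := by omega
              simp [this]
            · rw [htake, if_neg heq]
              have hne : ¬ ((m : Int) + 1 = (target.length : Int)) := by
                intro h
                have : m + 1 = target.length := by omega
                exact heq (by simp [this])
              rw [if_neg (by simp [hne])]
              apply ih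
              simp only [PvInv]
              exact ⟨m + 1, by push_cast; ring, by omega, rfl⟩
          · -- mismatch: ok becomes false
            have hcond : (true && decide ((m : Int) < (target.length : Int)) &&
                (PySem.List.pyGetD target (m : Int) 0 == item)) = false := by
              have hit' : ¬ target[m]?.getD 0 = item := by
                rwa [List.getD_eq_getElem?_getD] at hit
              simp [hit']
            rw [hcond]
            have hnp : ¬ (target.take m ++ [item]) <+: target :=
              not_prefix_of_ne_get target m item hlt hit
            have hne : target.take m ++ [item] ≠ target := by
              intro h; apply hnp; rw [h]
            rw [if_neg hne, if_neg (by simp)]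
            exact ih _ _ _ _ (by simp [PvInv, hnp])
        · -- k = len(target): new_target = target, gets longer ⇒ never prefix again
          have hm : m = target.length := by omega
          subst hm
          simp only [List.take_length]
          have hcond : (true && decide ((target.length : Int) < (target.length : Int)) &&
              (PySem.List.pyGetD target (target.length : Int) 0 == item)) = false := by simp
          rw [hcond]
          have hnp : ¬ (target ++ [item]) <+: target := by
            intro h
            have := h.length_le
            simp at this
          have hne : target ++ [item] ≠ target := by
            intro h; apply hnp; rw [h]
          rw [if_neg hne, if_neg (by simp)]
          exact ih _ _ _ _ (by simp [PvInv, hnp])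
      · -- ok = false: stays false, A's list stays non-prefix
        have hok' : ok = false := by simp at hok; exact hok
        subst hok'
        have hnp : ¬ new_target <+: target := by simp [PvInv] at hinv; exact hinv
        simp only [Bool.false_and]
        have hnp' : ¬ (new_target ++ [item]) <+: target := by
          intro h; exact hnp ((List.prefix_append new_target [item]).trans h)
        have hne : new_target ++ [item] ≠ target := by
          intro h; apply hnp'; rw [h]
        rw [if_neg hne, if_neg (by simp)]
        exact ih _ _ _ _ (by simp [PvInv, hnp'])
    · -- item ∉ target: push+pop, A's list unchanged
      simp only [if_neg hc]
      have hdrop : (new_target ++ [item]).dropLast = new_target := by simp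
      rw [hdrop]
      by_cases hbrk : new_target = target
      · -- both break
        rw [if_pos hbrk]
        subst hbrk
        have hokk : (ok && decide (k = (new_target.length : Int))) = true := by
          by_cases hok : ok = true
          · subst hok
            obtain ⟨m, hk, hmle, hnt⟩ := by simpa [PvInv] using hinv
            have : m = new_target.length := by omega
            simp [hk, this]
          · have hok' : ok = false := by simp at hok; exact hok
            subst hok'
            exact absurd (List.prefix_refl new_target) (by simpa [PvInv] using hinv)
        rw [if_pos hokk]
      · rw [if_neg hbrk]
        have hokk : (ok && decide (k = (target.length : Int))) = false := by
          by_cases hok : ok = true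
          · subst hok
            obtain ⟨m, hk, hmle, hnt⟩ := by simpa [PvInv] using hinv
            have hmne : m ≠ target.length := by
              intro h; exact hbrk (by simp [hnt, h])
            simp [hk]; omega
          · have hok' : ok = false := by simp at hok; exact hok
            simp [hok']
        rw [if_neg (by simp [hokk])]
        exact ih _ _ _ _ hinv

-- ===== VERDICT (by name: the statement is the Claim_ definition above) =====
theorem build_target_spec : Claim_equal_build_target := by
  intro target n _
  show build_target target n = build_target_alt target n
  unfold build_target build_target_alt
  refine go_eq target _ [] 0 true [] ?_
  simp only [PvInv]
  exact ⟨0, rfl, Nat.zero_le _, by simp⟩
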